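-- pv_equiv track=rewrite | github.com/wyattarnold/neuralhyd-ca | src/dpl/dataset.py | _nesting_groups
-- ===== SOURCE A (Python) =====
-- def _nesting_groups(gauge_huc12s: dict[int, list[str]]) -> list[list[int]]:
--     """Group gauges that share any HUC12 via union-find.
--
--     Two gauges are placed in the same group whenever their HUC12 sets
--     intersect — whether by strict nesting (one catchment fully contains
--     the other) or partial overlap (sharing one or more HUC12s without
--     containment).  Either case constitutes input leakage: a HUC12 forcing
--     tensor that drives one gauge in training would also drive the other
--     in validation.  Transitivity is handled by union-find.
--
--     Mirrors :func:`src.lstm.subbasin_dataset._nesting_groups` so the dPL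
--     and subbasin-LSTM pipelines partition the universe of gauges
--     consistently.
--     """
--     gauges = list(gauge_huc12s.keys())
--     sub_sets = {g: set(hs) for g, hs in gauge_huc12s.items()}
--
--     parent = list(range(len(gauges)))
--
--     def find(x: int) -> int:
--         while parent[x] != x:
--             parent[x] = parent[parent[x]]
--             x = parent[x]
--         return x
--
--     def union(x: int, y: int) -> None:
--         parent[find(x)] = find(y)
--
--     for i, a in enumerate(gauges):
--         for j, b in enumerate(gauges[i + 1:], start=i + 1):
--             if sub_sets[a] & sub_sets[b]:   # any shared HUC12 = leakage
--                 union(i, j)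
--
--     from collections import defaultdict
--     grp: dict[int, list[int]] = defaultdict(list)
--     for idx, g in enumerate(gauges):
--         grp[find(idx)].append(g)
--     return list(grp.values())
-- ===== SOURCE B (Python) =====
-- def _nesting_groups(gauge_huc12s: dict[int, list[str]]) -> list[list[int]]:
--     """Group gauges that share any HUC12, via an inverted HUC12->gauge index.
--
--     Instead of intersecting every pair of HUC12 sets (quadratic in the
--     number of gauges), record for each HUC12 the first gauge seen with it
--     and union every later holder with that first holder: the connected
--     components are identical, and only O(total memberships) union-find
--     operations are performed.
--     """
--     n = len(gauge_huc12s)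
--     parent = list(range(n))
--
--     def find(x: int) -> int:
--         while parent[x] != x:
--             parent[x] = parent[parent[x]]
--             x = parent[x]
--         return x
--
--     first_holder: dict[str, int] = {}
--     for i, hs in enumerate(gauge_huc12s.values()):
--         for h in hs:
--             if h in first_holder:
--                 parent[find(first_holder[h])] = find(i)
--             else:
--                 first_holder[h] = i
--
--     groups: dict[int, list[int]] = {}
--     for i, g in enumerate(gauge_huc12s.keys()):
--         groups.setdefault(find(i), []).append(g)
--     return list(groups.values())
-- ===== Notes on version B (the rewrite author's own statement) =====
-- stated objective: faster
-- what changed: B replaces A's O(n^2) pairwise HUC12-set intersection tests by an inverted index (first gauge seen per HUC12) and unions each later holder with that first holder, doing only O(total memberships) union-find operations.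
import Mathlib
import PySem

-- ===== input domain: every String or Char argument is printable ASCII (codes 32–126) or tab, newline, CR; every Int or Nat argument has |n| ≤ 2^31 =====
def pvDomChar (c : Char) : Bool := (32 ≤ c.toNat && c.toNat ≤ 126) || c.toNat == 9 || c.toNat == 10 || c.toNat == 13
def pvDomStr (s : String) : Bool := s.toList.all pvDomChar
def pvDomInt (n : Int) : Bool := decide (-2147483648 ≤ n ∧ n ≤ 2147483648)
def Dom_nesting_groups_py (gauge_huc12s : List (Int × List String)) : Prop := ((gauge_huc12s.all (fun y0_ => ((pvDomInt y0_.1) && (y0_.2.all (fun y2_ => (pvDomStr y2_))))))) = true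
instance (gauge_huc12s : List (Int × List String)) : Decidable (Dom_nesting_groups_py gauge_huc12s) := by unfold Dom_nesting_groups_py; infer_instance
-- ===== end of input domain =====

-- B replaces A's quadratic pairwise set-intersection test by an inverted HUC12->first-gauge
-- index (same union-find, asymptotically fewer union operations); A = B is proved on all inputs.

-- ===== PORT A =====
-- union-find `find` with path halving, shared verbatim by both Pythons.
-- The fuel argument (parent.length) only makes the Python `while` loop structurally
-- recursive: in a union-find forest the root is reached in < parent.length steps.
-- Indices into `parent` are always nonnegative and in range, so List.getD is exact
-- for Python's parent[x].
def pvFind : Nat → List Nat → Nat → List Nat × Nat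
  | 0, p, x => (p, x)
  | fuel+1, p, x =>
    let px := p.getD x 0
    if px = x then (p, x)
    else
      let g := p.getD px 0
      pvFind fuel (p.set x g) g

def pvUnion (p : List Nat) (x y : Nat) : List Nat :=
  let fx := pvFind p.length p x
  let fy := pvFind fx.1.length fx.1 y
  fy.1.set fx.2 fy.2

def nesting_groups_py (gauge_huc12s : List (Int × List String)) : List (List Int) :=
  let d : PySem.Dict Int (List String) := PySem.Dict.ofList gauge_huc12s
  let gauges : List Int := d.keys
  let subSets : PySem.Dict Int (PySem.Set String) :=
    PySem.Dict.ofList (d.items.map (fun gh => (gh.1, PySem.Set.ofList gh.2)))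
  let parent0 : List Nat := List.range gauges.length
  let parent := (gauges.zipIdx).foldl (fun p ai =>
    ((gauges.drop (ai.2+1)).zipIdx (ai.2+1)).foldl (fun p bj =>
      if PySem.Set.inter (subSets.getD ai.1 []) (subSets.getD bj.1 []) ≠ [] then
        pvUnion p ai.2 bj.2
      else p) p) parent0
  let fin := (gauges.zipIdx).foldl (fun (s : List Nat × PySem.Dict Nat (List Int)) gi =>
    let f := pvFind s.1.length s.1 gi.2
    (f.1, s.2.modify f.2 [] (· ++ [gi.1]))) (parent, PySem.Dict.empty)
  fin.2.values

-- ===== PORT B =====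
def nesting_groups_py_alt (gauge_huc12s : List (Int × List String)) : List (List Int) :=
  let d : PySem.Dict Int (List String) := PySem.Dict.ofList gauge_huc12s
  let parent0 : List Nat := List.range d.size
  let st := (d.values.zipIdx).foldl (fun (s : List Nat × PySem.Dict String Nat) hsi =>
    hsi.1.foldl (fun (s : List Nat × PySem.Dict String Nat) h =>
      match s.2.get? h with
      | some j =>
        let fj := pvFind s.1.length s.1 j
        let fi := pvFind fj.1.length fj.1 hsi.2
        (fi.1.set fj.2 fi.2, s.2)
      | none => (s.1, s.2.insert h hsi.2)) s) (parent0, PySem.Dict.empty)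
  let fin := (d.keys.zipIdx).foldl (fun (s : List Nat × PySem.Dict Nat (List Int)) gi =>
    let f := pvFind s.1.length s.1 gi.2
    (f.1, s.2.modify f.2 [] (· ++ [gi.1]))) (st.1, PySem.Dict.empty)
  fin.2.values

-- ===== PRECONDITION & SPEC =====
def Spec_nesting_groups_py (gauge_huc12s : List (Int × List String)) (out : List (List Int)) : Prop := out = nesting_groups_py_alt gauge_huc12s
instance (gauge_huc12s : List (Int × List String)) (out : List (List Int)) : Decidable (Spec_nesting_groups_py gauge_huc12s out) := by unfold Spec_nesting_groups_py; infer_instance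

-- ===== CLAIM =====
def Claim_equal_nesting_groups_py : Prop := ∀ (gauge_huc12s : List (Int × List String)), Dom_nesting_groups_py gauge_huc12s → Spec_nesting_groups_py gauge_huc12s (nesting_groups_py gauge_huc12s)

-- ===== LEMMAS AND PROOFS =====
-- ===== abstract root theory =====
def Rooted (p : List Nat) (x r : Nat) : Prop :=
  Relation.ReflTransGen (fun a b => b = p.getD a 0) x r ∧ p.getD r 0 = r

theorem fix_reach {p : List Nat} {x y : Nat} (hf : p.getD x 0 = x)
    (h : Relation.ReflTransGen (fun a b => b = p.getD a 0) x y) : y = x := by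
  induction h with
  | refl => rfl
  | tail _ hstep ih => subst hstep; rw [ih, hf]

theorem rooted_unique {p : List Nat} {x r r' : Nat} (h : Rooted p x r) (h' : Rooted p x r') : r = r' := by
  obtain ⟨hc, hf⟩ := h
  obtain ⟨hc', hf'⟩ := h'
  induction hc using Relation.ReflTransGen.head_induction_on with
  | refl => exact (fix_reach hf hc').symm
  | @head a c hstep hrest ih =>
    by_cases hfa : p.getD a 0 = a
    · subst hstep; rw [hfa] at *; exact ih hc'
    · rcases Relation.ReflTransGen.cases_head hc' with heq | ⟨c2, hstep2, hrest2⟩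
      · exact absurd (heq ▸ hf') hfa
      · subst hstep; subst hstep2; exact ih hrest2

noncomputable def rootOf (p : List Nat) (x : Nat) : Nat :=
  @dite _ (∃ r, Rooted p x r) (Classical.dec _) (fun h => h.choose) (fun _ => x)

theorem rootOf_eq {p : List Nat} {x r : Nat} (h : Rooted p x r) : rootOf p x = r := by
  have hex : ∃ r, Rooted p x r := ⟨r, h⟩
  simp only [rootOf]
  rw [dif_pos hex]
  exact rooted_unique hex.choose_spec h

def GoodC (p : List Nat) (hgt : Nat → Nat) : Prop :=
  (∀ i, i < p.length → p.getD i 0 < p.length) ∧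
  (∀ i, i < p.length → p.getD i 0 ≠ i → hgt (p.getD i 0) < hgt i)

theorem exists_rooted {p : List Nat} {hgt : Nat → Nat} (hG : GoodC p hgt) :
    ∀ x, x < p.length → ∃ r, Rooted p x r ∧ r < p.length := by
  intro x hx
  induction hm : hgt x using Nat.strong_induction_on generalizing x with
  | _ m ih =>
  subst hm
  by_cases hfix : p.getD x 0 = x
  · exact ⟨x, ⟨Relation.ReflTransGen.refl, hfix⟩, hx⟩
  · obtain ⟨r, hr, hrlt⟩ := ih (hgt (p.getD x 0)) (hG.2 x hx hfix) (p.getD x 0) (hG.1 x hx) rfl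
    exact ⟨r, ⟨Relation.ReflTransGen.head rfl hr.1, hr.2⟩, hrlt⟩

theorem rootOf_fix {p : List Nat} {x : Nat} (h : p.getD x 0 = x) : rootOf p x = x :=
  rootOf_eq ⟨Relation.ReflTransGen.refl, h⟩

theorem rootOf_parent {p : List Nat} {hgt : Nat → Nat} (hG : GoodC p hgt) {x : Nat} (hx : x < p.length) :
    rootOf p x = rootOf p (p.getD x 0) := by
  obtain ⟨r, hr, _⟩ := exists_rooted hG (p.getD x 0) (hG.1 x hx)
  rw [rootOf_eq hr, rootOf_eq ⟨Relation.ReflTransGen.head rfl hr.1, hr.2⟩]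

theorem rootOf_spec {p : List Nat} {hgt : Nat → Nat} (hG : GoodC p hgt) {x : Nat} (hx : x < p.length) :
    rootOf p x < p.length ∧ p.getD (rootOf p x) 0 = rootOf p x := by
  obtain ⟨r, hr, hlt⟩ := exists_rooted hG x hx
  rw [rootOf_eq hr]; exact ⟨hlt, hr.2⟩

theorem getD_set_self {p : List Nat} {x g : Nat} (hx : x < p.length) : (p.set x g).getD x 0 = g := by
  simp [List.getD_eq_getElem?_getD, List.getElem?_set, hx]

theorem getD_set_ne {p : List Nat} {x g y : Nat} (h : y ≠ x) : (p.set x g).getD y 0 = p.getD y 0 := by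
  simp [List.getD_eq_getElem?_getD, List.getElem?_set, Ne.symm h]

theorem set_preserves {p : List Nat} {hgt : Nat → Nat} {x g : Nat}
    (hG : GoodC p hgt) (hx : x < p.length) (hg : g < p.length)
    (hlt : hgt g < hgt x) (hr : rootOf p g = rootOf p x) :
    GoodC (p.set x g) hgt ∧ ∀ y, y < p.length → rootOf (p.set x g) y = rootOf p y := by
  have hlen : (p.set x g).length = p.length := p.length_set
  have hG' : GoodC (p.set x g) hgt := by
    constructor
    · intro i hi
      rw [hlen] at hi ⊢
      by_cases hix : i = x
      · subst hix; rw [getD_set_self hx]; exact hg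
      · rw [getD_set_ne hix]; exact hG.1 i hi
    · intro i hi hne
      rw [hlen] at hi
      by_cases hix : i = x
      · subst hix; rw [getD_set_self hx] at *; exact hlt
      · rw [getD_set_ne hix] at *; exact hG.2 i hi hne
  refine ⟨hG', ?_⟩
  intro y hy
  induction hm : hgt y using Nat.strong_induction_on generalizing y with
  | _ m ih =>
  subst hm
  by_cases hfix : (p.set x g).getD y 0 = y
  · have hyx : y ≠ x := by
      intro he; subst he
      rw [getD_set_self hx] at hfix
      subst hfix; omega
    rw [rootOf_fix hfix, rootOf_fix (getD_set_ne hyx ▸ hfix : p.getD y 0 = y)]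
  · by_cases hyx : y = x
    · subst hyx
      rw [rootOf_parent hG' (hlen ▸ hx), getD_set_self hx,
        ih (hgt g) hlt g hg rfl, hr]
    · rw [rootOf_parent hG' (hlen ▸ hy), getD_set_ne hyx]
      rw [getD_set_ne hyx] at hfix
      rw [ih (hgt (p.getD y 0)) (hG.2 y hy hfix) _ (hG.1 y hy) rfl]
      exact (rootOf_parent hG hy).symm

theorem union_char {p : List Nat} {hgt : Nat → Nat} {rx ry : Nat}
    (hG : GoodC p hgt) (hrx : rx < p.length) (hry : ry < p.length)
    (fx : p.getD rx 0 = rx) (fy : p.getD ry 0 = ry) :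
    ∃ hgt', GoodC (p.set rx ry) hgt' ∧
      ∀ y, y < p.length → rootOf (p.set rx ry) y = if rootOf p y = rx then ry else rootOf p y := by
  set hgt' : Nat → Nat := fun i => if rootOf p i = rx then hgt i + hgt ry + 1 else hgt i with hh
  have hlen : (p.set rx ry).length = p.length := p.length_set
  have hroot_parent : ∀ i, i < p.length → rootOf p (p.getD i 0) = rootOf p i :=
    fun i hi => (rootOf_parent hG hi).symm
  have hG' : GoodC (p.set rx ry) hgt' := by
    constructor
    · intro i hi
      rw [hlen] at hi ⊢
      by_cases hix : i = rx
      · subst hix; rw [getD_set_self hrx]; exact hry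
      · rw [getD_set_ne hix]; exact hG.1 i hi
    · intro i hi hne
      rw [hlen] at hi
      by_cases hix : i = rx
      · rw [hix] at hne ⊢
        rw [getD_set_self hrx] at hne ⊢
        have h1 : rootOf p ry = ry := rootOf_fix fy
        have h2 : rootOf p rx = rx := rootOf_fix fx
        simp only [hh]
        rw [h1, h2, if_pos rfl, if_neg (by omega : ry ≠ rx)]
        omega
      · rw [getD_set_ne hix] at hne ⊢
        have := hG.2 i hi hne
        have hpar := hroot_parent i hi
        simp only [hh]
        rw [hpar]
        split_ifs <;> omega
  refine ⟨hgt', hG', ?_⟩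
  intro y hy
  induction hm : hgt' y using Nat.strong_induction_on generalizing y with
  | _ m ih =>
  subst hm
  by_cases hyx : y = rx
  · rw [hyx]
    have h2 : rootOf p rx = rx := rootOf_fix fx
    rw [if_pos h2]
    by_cases hxy : ry = rx
    · subst hxy
      exact rootOf_fix (by rw [getD_set_self hrx])
    · have hry' : rootOf p ry = ry := rootOf_fix fy
      have hfix' : ¬ (p.set rx ry).getD rx 0 = rx := by rw [getD_set_self hrx]; exact hxy
      have hlt1 : hgt' ry < hgt' rx := by
        simp only [hh]
        rw [hry', h2, if_neg hxy, if_pos rfl]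
        omega
      rw [← hyx] at hlt1
      rw [rootOf_parent hG' (hlen ▸ hrx), getD_set_self hrx]
      rw [ih (hgt' ry) hlt1 ry hry rfl]
      rw [hry', if_neg hxy]
  · by_cases hfix : (p.set rx ry).getD y 0 = y
    · rw [getD_set_ne hyx] at hfix
      have h1 : rootOf p y = y := rootOf_fix hfix
      rw [rootOf_fix (by rw [getD_set_ne hyx]; exact hfix : (p.set rx ry).getD y 0 = y), h1, if_neg hyx]
    · rw [getD_set_ne hyx] at hfix
      have hlt2 : hgt' (p.getD y 0) < hgt' y := by
        have hd := hG.2 y hy hfix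
        have hpar := hroot_parent y hy
        simp only [hh]
        rw [hpar]
        split_ifs <;> omega
      rw [rootOf_parent hG' (hlen ▸ hy), getD_set_ne hyx]
      rw [ih (hgt' (p.getD y 0)) hlt2 _ (hG.1 y hy) rfl]
      rw [hroot_parent y hy]

theorem pvFind_succ (fuel : Nat) (p : List Nat) (x : Nat) :
    pvFind (fuel+1) p x = if p.getD x 0 = x then (p, x)
      else pvFind fuel (p.set x (p.getD (p.getD x 0) 0)) (p.getD (p.getD x 0) 0) := rfl

theorem pvFind_spec : ∀ (fuel : Nat) (p : List Nat) (hgt : Nat → Nat) (x : Nat) (V : Finset Nat),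
    GoodC p hgt → x < p.length → x ∉ V → (∀ v ∈ V, hgt x < hgt v) →
    (∀ v ∈ V, v < p.length) → p.length ≤ V.card + fuel →
    (pvFind fuel p x).2 = rootOf p x ∧ (pvFind fuel p x).1.length = p.length ∧
    GoodC (pvFind fuel p x).1 hgt ∧ ∀ y, y < p.length → rootOf (pvFind fuel p x).1 y = rootOf p y := by
  intro fuel
  induction fuel with
  | zero =>
    intro p hgt x V hG hx hxV hhgt hVlt hcard
    exfalso
    have hsub : insert x V ⊆ Finset.range p.length := by
      intro v hv
      rcases Finset.mem_insert.mp hv with rfl | hv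
      · exact Finset.mem_range.mpr hx
      · exact Finset.mem_range.mpr (hVlt v hv)
    have := Finset.card_le_card hsub
    rw [Finset.card_insert_of_notMem hxV, Finset.card_range] at this
    omega
  | succ fuel ih =>
    intro p hgt x V hG hx hxV hhgt hVlt hcard
    show _ ∧ _
    by_cases hfix : p.getD x 0 = x
    · rw [pvFind_succ, if_pos hfix]
      exact ⟨(rootOf_fix hfix).symm, rfl, hG, fun y _ => rfl⟩
    · have hpx : p.getD x 0 < p.length := hG.1 x hx
      set g := p.getD (p.getD x 0) 0 with hg
      have hgl : g < p.length := hG.1 _ hpx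
      have hstep : pvFind (fuel+1) p x = pvFind fuel (p.set x g) g := by
        rw [pvFind_succ, if_neg hfix]
      have hltg : hgt g < hgt x := by
        have h1 := hG.2 x hx hfix
        by_cases h2 : p.getD (p.getD x 0) 0 = p.getD x 0
        · rw [hg, h2]; exact h1
        · exact lt_trans (hG.2 _ hpx h2) h1
      have hrg : rootOf p g = rootOf p x := by
        rw [rootOf_parent hG hx, rootOf_parent hG hpx]
      obtain ⟨hG', hpres⟩ := set_preserves hG hx hgl hltg hrg
      have hlen' : (p.set x g).length = p.length := p.length_set
      have hrec := ih (p.set x g) hgt g (insert x V) hG' (hlen' ▸ hgl)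
        (by
          intro hmem
          rcases Finset.mem_insert.mp hmem with h | h
          · rw [h] at hltg; omega
          · have := hhgt g h; omega)
        (by
          intro v hv
          rcases Finset.mem_insert.mp hv with rfl | hv
          · exact hltg
          · exact lt_trans hltg (hhgt v hv))
        (by
          intro v hv
          rw [hlen']
          rcases Finset.mem_insert.mp hv with rfl | hv
          · exact hx
          · exact hVlt v hv)
        (by rw [hlen', Finset.card_insert_of_notMem hxV]; omega)
      rw [hstep]
      refine ⟨?_, ?_, hrec.2.2.1, ?_⟩
      · rw [hrec.1, hpres g hgl, hrg]
      · rw [hrec.2.1, hlen']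
      · intro y hy
        rw [hrec.2.2.2 y (hlen' ▸ hy), hpres y hy]

theorem pvFind_run {p : List Nat} {hgt : Nat → Nat} (hG : GoodC p hgt) {x : Nat} (hx : x < p.length) :
    (pvFind p.length p x).2 = rootOf p x ∧ (pvFind p.length p x).1.length = p.length ∧
    GoodC (pvFind p.length p x).1 hgt ∧ ∀ y, y < p.length → rootOf (pvFind p.length p x).1 y = rootOf p y :=
  pvFind_spec p.length p hgt x ∅ hG hx (Finset.notMem_empty x)
    (fun v hv => absurd hv (Finset.notMem_empty v))
    (fun v hv => absurd hv (Finset.notMem_empty v)) (by simp)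

theorem pvUnion_spec {p : List Nat} {hgt : Nat → Nat} (hG : GoodC p hgt) {x y : Nat}
    (hx : x < p.length) (hy : y < p.length) :
    ∃ hgt', GoodC (pvUnion p x y) hgt' ∧ (pvUnion p x y).length = p.length ∧
      ∀ a, a < p.length → rootOf (pvUnion p x y) a =
        if rootOf p a = rootOf p x then rootOf p y else rootOf p a := by
  obtain ⟨h1, h2, h3, h4⟩ := pvFind_run hG hx
  set p1 := (pvFind p.length p x).1 with hp1
  set rx := (pvFind p.length p x).2 with hrx
  obtain ⟨h5, h6, h7, h8⟩ := pvFind_run h3 (x := y) (by omega)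
  rw [h2] at h5 h6 h7 h8
  set p2 := (pvFind p.length p1 y).1 with hp2
  set ry := (pvFind p.length p1 y).2 with hry
  have hUn : pvUnion p x y = p2.set rx ry := by
    rw [pvUnion, ← hp1, ← hrx, h2, ← hp2, ← hry]
  have hrxv : rx = rootOf p x := h1
  have hryv : ry = rootOf p y := by rw [h5, h4 y hy]
  -- rx is a root of p, hence of p2
  have hrootx := rootOf_spec hG hx
  have hrooty := rootOf_spec hG hy
  have hrx_lt : rx < p.length := by rw [hrxv]; exact hrootx.1
  have hry_lt : ry < p.length := by rw [hryv]; exact hrooty.1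
  have hrootx2 : rootOf p2 rx = rx := by
    rw [h8 rx hrx_lt, h4 rx hrx_lt, hrxv, rootOf_fix hrootx.2]
  have hrooty2 : rootOf p2 ry = ry := by
    rw [h8 ry hry_lt, h4 ry hry_lt, hryv, rootOf_fix hrooty.2]
  -- fixedness in p2
  obtain ⟨rx', hrx', hrxlt'⟩ := exists_rooted h7 rx (by omega)
  have : rx' = rx := by rw [← rootOf_eq hrx', hrootx2]
  subst this
  obtain ⟨ry', hry', hrylt'⟩ := exists_rooted h7 ry (by omega)
  have : ry' = ry := by rw [← rootOf_eq hry', hrooty2]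
  subst this
  obtain ⟨hgt', hG', hchar⟩ := union_char h7 (by omega) (by omega) hrx'.2 hry'.2
  refine ⟨hgt', hUn ▸ hG', ?_, ?_⟩
  · rw [hUn, List.length_set]; omega
  · intro a ha
    rw [hUn, hchar a (by omega), h8 a (by omega), h4 a ha, hrxv, hryv]

-- ===== equivalence-closure lemmas =====
theorem eqvGen_mono_derivable {r s : Nat → Nat → Prop}
    (h : ∀ u v, r u v → Relation.EqvGen s u v) {a b : Nat}
    (hab : Relation.EqvGen r a b) : Relation.EqvGen s a b := by
  induction hab with
  | rel u v huv => exact h u v huv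
  | refl u => exact Relation.EqvGen.refl u
  | symm u v _ ih => exact Relation.EqvGen.symm u v ih
  | trans u v w _ _ ih1 ih2 => exact Relation.EqvGen.trans u v w ih1 ih2

theorem eqvGen_congr {r s : Nat → Nat → Prop}
    (h1 : ∀ u v, r u v → Relation.EqvGen s u v)
    (h2 : ∀ u v, s u v → Relation.EqvGen r u v) (a b : Nat) :
    Relation.EqvGen r a b ↔ Relation.EqvGen s a b :=
  ⟨eqvGen_mono_derivable h1, eqvGen_mono_derivable h2⟩

theorem eqvGen_pair_iff {q : Nat → Nat → Prop} (hq : Equivalence q) (x y a b : Nat) :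
    Relation.EqvGen (fun u v => (u = x ∧ v = y) ∨ q u v) a b ↔
      q a b ∨ (q a x ∧ q y b) ∨ (q a y ∧ q x b) := by
  constructor
  · intro h
    induction h with
    | rel u v huv =>
      rcases huv with ⟨h1, h2⟩ | hq'
      · exact Or.inr (Or.inl ⟨by rw [h1]; exact hq.refl x, by rw [h2]; exact hq.refl y⟩)
      · exact Or.inl hq'
    | refl u => exact Or.inl (hq.refl u)
    | symm u v _ ih =>
      rcases ih with h | ⟨h1, h2⟩ | ⟨h1, h2⟩
      · exact Or.inl (hq.symm h)
      · exact Or.inr (Or.inr ⟨hq.symm h2, hq.symm h1⟩)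
      · exact Or.inr (Or.inl ⟨hq.symm h2, hq.symm h1⟩)
    | trans u v w _ _ ih1 ih2 =>
      rcases ih1 with h | ⟨h1, h2⟩ | ⟨h1, h2⟩ <;>
        rcases ih2 with h' | ⟨h1', h2'⟩ | ⟨h1', h2'⟩
      · exact Or.inl (hq.trans h h')
      · exact Or.inr (Or.inl ⟨hq.trans h h1', h2'⟩)
      · exact Or.inr (Or.inr ⟨hq.trans h h1', h2'⟩)
      · exact Or.inr (Or.inl ⟨h1, hq.trans h2 h'⟩)
      · exact Or.inl (hq.trans h1 (hq.trans (hq.symm (hq.trans h2 h1')) h2'))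
      · exact Or.inl (hq.trans h1 h2')
      · exact Or.inr (Or.inr ⟨h1, hq.trans h2 h'⟩)
      · exact Or.inl (hq.trans h1 h2')
      · exact Or.inl (hq.trans h1 (hq.trans (hq.symm h1') (hq.trans (hq.symm h2) h2')))
  · intro h
    have hgen : ∀ u v, q u v → Relation.EqvGen (fun u v => (u = x ∧ v = y) ∨ q u v) u v :=
      fun u v huv => Relation.EqvGen.rel u v (Or.inr huv)
    have hpair : Relation.EqvGen (fun u v => (u = x ∧ v = y) ∨ q u v) x y :=
      Relation.EqvGen.rel x y (Or.inl ⟨rfl, rfl⟩)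
    rcases h with h | ⟨h1, h2⟩ | ⟨h1, h2⟩
    · exact hgen a b h
    · exact Relation.EqvGen.trans _ _ _ (hgen a x h1)
        (Relation.EqvGen.trans _ _ _ hpair (hgen y b h2))
    · exact Relation.EqvGen.trans _ _ _ (hgen a y h1)
        (Relation.EqvGen.trans _ _ _ (Relation.EqvGen.symm _ _ hpair) (hgen x b h2))

-- ===== shared-HUC12 relation =====
def ShareH (hss : List (List String)) (u v : Nat) : Prop :=
  ∃ h, h ∈ hss.getD u [] ∧ h ∈ hss.getD v []

theorem shareH_lt {hss : List (List String)} {u v : Nat} (h : ShareH hss u v) :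
    u < hss.length ∧ v < hss.length := by
  obtain ⟨x, hu, hv⟩ := h
  constructor
  · by_contra hc
    rw [List.getD_eq_getElem?_getD, List.getElem?_eq_none (by omega)] at hu
    exact absurd hu (List.not_mem_nil)
  · by_contra hc
    rw [List.getD_eq_getElem?_getD, List.getElem?_eq_none (by omega)] at hv
    exact absurd hv (List.not_mem_nil)

theorem shareH_symm {hss : List (List String)} {u v : Nat} (h : ShareH hss u v) : ShareH hss v u := by
  obtain ⟨x, hu, hv⟩ := h; exact ⟨x, hv, hu⟩

theorem ite_merge_iff (a b rx ry : Nat) :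
    ((if a = rx then ry else a) = (if b = rx then ry else b)) ↔
      (a = b ∨ (a = rx ∧ ry = b) ∨ (a = ry ∧ rx = b)) := by
  split_ifs <;> omega

-- pattern after a union, in EqvGen form
theorem pat_union_eqv {p : List Nat} {hgt : Nat → Nat} {R : Nat → Nat → Prop} {x y : Nat}
    (hG : GoodC p hgt) (hx : x < p.length) (hy : y < p.length)
    (hinv : ∀ u v, u < p.length → v < p.length → (rootOf p u = rootOf p v ↔ Relation.EqvGen R u v)) :
    ∀ u v, u < p.length → v < p.length →
      (rootOf (pvUnion p x y) u = rootOf (pvUnion p x y) v ↔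
        Relation.EqvGen (fun a b => (a = x ∧ b = y) ∨ Relation.EqvGen R a b) u v) := by
  intro u v hu hv
  obtain ⟨hgt', hG', hlen, hchar⟩ := pvUnion_spec hG hx hy
  rw [hchar u hu, hchar v hv,
    eqvGen_pair_iff (Relation.EqvGen.is_equivalence R) x y u v,
    ← hinv u v hu hv, ← hinv u x hu hx, ← hinv y v hy hv, ← hinv u y hu hy, ← hinv x v hx hv]
  exact ite_merge_iff _ _ _ _

-- ===== union-find state invariant =====
def UFInv (n : Nat) (p : List Nat) (R : Nat → Nat → Prop) : Prop :=
  (∃ hgt, GoodC p hgt) ∧ p.length = n ∧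
  (∀ u v, u < n → v < n → (rootOf p u = rootOf p v ↔ Relation.EqvGen R u v))

theorem UFInv_congr {n : Nat} {p : List Nat} {R R' : Nat → Nat → Prop} (h : UFInv n p R)
    (h1 : ∀ u v, R u v → Relation.EqvGen R' u v)
    (h2 : ∀ u v, R' u v → Relation.EqvGen R u v) : UFInv n p R' :=
  ⟨h.1, h.2.1, fun u v hu hv => (h.2.2 u v hu hv).trans (eqvGen_congr h1 h2 u v)⟩

theorem UFInv_union {n : Nat} {p : List Nat} {R : Nat → Nat → Prop} {x y : Nat}
    (h : UFInv n p R) (hx : x < n) (hy : y < n) :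
    UFInv n (pvUnion p x y) (fun a b => (a = x ∧ b = y) ∨ R a b) := by
  obtain ⟨⟨hgt, hG⟩, hlen, hinv⟩ := h
  obtain ⟨hgt', hG', hlen', _⟩ := pvUnion_spec hG (hlen ▸ hx) (hlen ▸ hy)
  refine ⟨⟨hgt', hG'⟩, by omega, ?_⟩
  intro u v hu hv
  rw [pat_union_eqv hG (hlen ▸ hx) (hlen ▸ hy) (by rw [hlen]; exact hinv) u v (by omega) (by omega)]
  refine eqvGen_congr ?_ ?_ u v
  · intro a b hab
    rcases hab with hab | hab
    · exact Relation.EqvGen.rel a b (Or.inl hab)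
    · exact eqvGen_mono_derivable (fun c d hcd => Relation.EqvGen.rel c d (Or.inr hcd)) hab
  · intro a b hab
    rcases hab with hab | hab
    · exact Relation.EqvGen.rel a b (Or.inl hab)
    · exact Relation.EqvGen.rel a b (Or.inr (Relation.EqvGen.rel a b hab))

def GenR (hss : List (List String)) (k : Nat) (u v : Nat) : Prop :=
  ShareH hss u v ∧ min u v < k

def GenA (hss : List (List String)) (i j : Nat) (u v : Nat) : Prop :=
  ShareH hss u v ∧ (min u v < i ∨ (min u v = i ∧ max u v < j))

theorem UFInv_init (n : Nat) (hss : List (List String)) :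
    UFInv n (List.range n) (GenR hss 0) := by
  have hfix : ∀ u, u < n → (List.range n).getD u 0 = u := by
    intro u hu
    rw [List.getD_eq_getElem?_getD, List.getElem?_eq_getElem (by simpa using hu)]
    simp
  refine ⟨⟨fun _ => 0, ?_, ?_⟩, by simp, ?_⟩
  · intro i hi; rw [List.length_range] at hi; rw [hfix i hi]; simpa using hi
  · intro i hi hne; rw [List.length_range] at hi; exact absurd (hfix i hi) hne
  · intro u v hu hv
    rw [rootOf_fix (hfix u hu), rootOf_fix (hfix v hv)]
    constructor
    · intro he; rw [he]; exact Relation.EqvGen.refl v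
    · intro he
      have : Relation.EqvGen (fun a b : Nat => a = b) u v :=
        eqvGen_mono_derivable (fun a b hab => absurd hab.2 (by omega)) he
      rwa [Equivalence.eqvGen_iff eq_equivalence] at this

theorem A_inner (hss : List (List String)) (gauges : List Int) (n : Nat)
    (hn : n = gauges.length) (c : Nat → Bool) (i : Nat) (hi : i < n)
    (hc : ∀ j, j < n → (c j = true ↔ ShareH hss i j)) :
    ∀ (xs : List Int) (k : Nat) (p : List Nat),
      gauges.drop k = xs → i < k →
      UFInv n p (GenA hss i k) →
      UFInv n ((xs.zipIdx k).foldl (fun p bj => if c bj.2 then pvUnion p i bj.2 else p) p)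
        (GenA hss i (k + xs.length)) := by
  intro xs
  induction xs with
  | nil => intro k p _ _ h; simpa using h
  | cons b xs ih =>
    intro k p hdrop hik h
    have hk : k < gauges.length := by
      by_contra hc'
      rw [List.drop_eq_nil_of_le (by omega)] at hdrop
      exact absurd hdrop.symm (List.cons_ne_nil b xs)
    have hdrop' : gauges.drop (k+1) = xs := by
      rw [← List.drop_drop, hdrop]
      simp
    rw [List.zipIdx_cons, List.foldl_cons]
    have hgoal_len : k + (b :: xs).length = (k+1) + xs.length := by simp; omega
    rw [hgoal_len]
    by_cases hcb : c k = true
    · rw [if_pos hcb]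
      apply ih (k+1) _ hdrop' (by omega)
      have hSik : ShareH hss i k := (hc k (by omega)).mp hcb
      have h1 := UFInv_union (x := i) (y := k) h hi (by omega)
      apply UFInv_congr h1
      · intro u v huv
        rcases huv with ⟨rfl, rfl⟩ | huv
        · exact Relation.EqvGen.rel u v ⟨hSik, by omega⟩
        · refine Relation.EqvGen.rel u v ⟨huv.1, by rcases huv.2 with hh | hh; omega; omega⟩
      · intro u v huv
        obtain ⟨hS, hcase⟩ := huv
        rcases hcase with hh | ⟨hmin, hmax⟩
        · exact Relation.EqvGen.rel u v (Or.inr ⟨hS, Or.inl hh⟩)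
        · -- min u v = i, max u v < k+1
          by_cases hmm : max u v < k
          · exact Relation.EqvGen.rel u v (Or.inr ⟨hS, Or.inr ⟨hmin, hmm⟩⟩)
          · have hmax' : max u v = k := by omega
            -- {u,v} = {i,k}
            by_cases huv' : u ≤ v
            · have : u = i ∧ v = k := by omega
              exact Relation.EqvGen.rel u v (Or.inl this)
            · have : v = i ∧ u = k := by omega
              exact Relation.EqvGen.symm _ _ (Relation.EqvGen.rel v u (Or.inl this))
    · rw [if_neg hcb]
      apply ih (k+1) _ hdrop' (by omega)
      apply UFInv_congr h
      · intro u v huv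
        exact Relation.EqvGen.rel u v ⟨huv.1, by rcases huv.2 with hh | hh; omega; omega⟩
      · intro u v huv
        obtain ⟨hS, hcase⟩ := huv
        rcases hcase with hh | ⟨hmin, hmax⟩
        · exact Relation.EqvGen.rel u v ⟨hS, Or.inl hh⟩
        · by_cases hmm : max u v < k
          · exact Relation.EqvGen.rel u v ⟨hS, Or.inr ⟨hmin, hmm⟩⟩
          · -- max u v = k, min = i: would mean ShareH i k, contradicting c k = false
            have hmax' : max u v = k := by omega
            exfalso
            apply hcb
            rw [hc k (by omega)]
            by_cases huv' : u ≤ v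
            · have : u = i ∧ v = k := by omega
              rw [← this.1, ← this.2]; exact hS
            · have : v = i ∧ u = k := by omega
              rw [← this.1, ← this.2]; exact shareH_symm hS

theorem A_outer (hss : List (List String)) (gauges : List Int) (n : Nat)
    (hn : n = gauges.length) (hlenh : hss.length = n) (c2 : Nat → Nat → Bool)
    (hc2 : ∀ i j, i < n → j < n → (c2 i j = true ↔ ShareH hss i j)) :
    ∀ (xs : List Int) (k : Nat) (p : List Nat), gauges.drop k = xs →
      UFInv n p (GenR hss k) →
      UFInv n ((xs.zipIdx k).foldl (fun p ai =>
          ((gauges.drop (ai.2+1)).zipIdx (ai.2+1)).foldl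
            (fun p bj => if c2 ai.2 bj.2 then pvUnion p ai.2 bj.2 else p) p) p)
        (GenR hss (k + xs.length)) := by
  intro xs
  induction xs with
  | nil => intro k p _ h; simpa using h
  | cons a xs ih =>
    intro k p hdrop h
    have hk : k < gauges.length := by
      by_contra hc'
      rw [List.drop_eq_nil_of_le (by omega)] at hdrop
      exact absurd hdrop.symm (List.cons_ne_nil a xs)
    have hdrop' : gauges.drop (k+1) = xs := by
      rw [← List.drop_drop, hdrop]; simp
    rw [List.zipIdx_cons, List.foldl_cons]
    have hlen2 : k + (a :: xs).length = (k+1) + xs.length := by simp; omega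
    rw [hlen2]
    apply ih (k+1) _ hdrop'
    -- one full row: GenR k ⇒ GenA k (k+1) ⇒ (inner) GenA k n ⇒ GenR (k+1)
    have hrow := A_inner hss gauges n hn (fun j => c2 k j) k (by omega)
      (fun j hj => hc2 k j (by omega) hj)
      (gauges.drop (k+1)) (k+1) p rfl (by omega)
      (UFInv_congr h
        (fun u v huv => Relation.EqvGen.rel u v ⟨huv.1, Or.inl huv.2⟩)
        (fun u v huv => by
          rcases huv.2 with hh | ⟨hmin, hmax⟩
          · exact Relation.EqvGen.rel u v ⟨huv.1, hh⟩
          · have : u = v := by omega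
            rw [this]; exact Relation.EqvGen.refl v))
    have hlen3 : (k+1) + (gauges.drop (k+1)).length = n := by
      rw [List.length_drop]; omega
    rw [hlen3] at hrow
    apply UFInv_congr hrow
    · intro u v huv
      refine Relation.EqvGen.rel u v ⟨huv.1, ?_⟩
      rcases huv.2 with hh | ⟨hmin, _⟩ <;> omega
    · intro u v huv
      obtain ⟨hS, hmin⟩ := huv
      have hb := shareH_lt hS
      refine Relation.EqvGen.rel u v ⟨hS, ?_⟩
      by_cases hmm : min u v < k
      · exact Or.inl hmm
      · exact Or.inr ⟨by omega, by omega⟩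

theorem A_run (hss : List (List String)) (gauges : List Int) (n : Nat)
    (hn : n = gauges.length) (hlenh : hss.length = n) (c2 : Nat → Nat → Bool)
    (hc2 : ∀ i j, i < n → j < n → (c2 i j = true ↔ ShareH hss i j)) :
    UFInv n ((gauges.zipIdx).foldl (fun p ai =>
        ((gauges.drop (ai.2+1)).zipIdx (ai.2+1)).foldl
          (fun p bj => if c2 ai.2 bj.2 then pvUnion p ai.2 bj.2 else p) p) (List.range n))
      (ShareH hss) := by
  have h := A_outer hss gauges n hn hlenh c2 hc2 gauges 0 (List.range n) (by simp)
    (UFInv_init n hss)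
  simp only [Nat.zero_add] at h
  apply UFInv_congr h
  · intro u v huv
    exact Relation.EqvGen.rel u v huv.1
  · intro u v huv
    have hb := shareH_lt huv
    exact Relation.EqvGen.rel u v ⟨huv, by omega⟩

-- ===== B side =====
def GenBR (hss : List (List String)) (k : Nat) (u v : Nat) : Prop :=
  u < k ∧ v < k ∧ ShareH hss u v

def GenB (hss : List (List String)) (k : Nat) (hsp : List String) (u v : Nat) : Prop :=
  (u < k ∧ v < k ∧ ShareH hss u v) ∨
  (u = k ∧ v < k ∧ ∃ h ∈ hsp, h ∈ hss.getD v []) ∨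
  (v = k ∧ u < k ∧ ∃ h ∈ hsp, h ∈ hss.getD u [])

def fhW (hss : List (List String)) (k : Nat) (hsp : List String) (h : String) : Option Nat :=
  match (List.range k).find? (fun j => decide (h ∈ hss.getD j [])) with
  | some j => some j
  | none => if h ∈ hsp then some k else none

def OwnInv (hss : List (List String)) (k : Nat) (hsp : List String)
    (ow : PySem.Dict String Nat) : Prop :=
  ∀ h, ow.get? h = fhW hss k hsp h

theorem fhW_some {hss : List (List String)} {k : Nat} {hsp : List String} {h : String} {j : Nat}
    (hf : fhW hss k hsp h = some j) :
    (j < k ∧ h ∈ hss.getD j []) ∨ (j = k ∧ h ∈ hsp) := by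
  rw [fhW] at hf
  rcases hfind : (List.range k).find? (fun j => decide (h ∈ hss.getD j [])) with _ | j'
  · rw [hfind] at hf
    simp only at hf
    split_ifs at hf with hmem
    · exact Or.inr ⟨(Option.some_injective _ hf).symm, hmem⟩
  · rw [hfind] at hf
    simp only [Option.some.injEq] at hf
    subst hf
    have h1 := List.find?_some hfind
    have h2 := List.mem_of_find?_eq_some hfind
    rw [List.mem_range] at h2
    simp only [decide_eq_true_eq] at h1
    exact Or.inl ⟨h2, h1⟩

theorem fhW_none {hss : List (List String)} {k : Nat} {hsp : List String} {h : String}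
    (hf : fhW hss k hsp h = none) :
    (∀ j, j < k → h ∉ hss.getD j []) ∧ h ∉ hsp := by
  rw [fhW] at hf
  rcases hfind : (List.range k).find? (fun j => decide (h ∈ hss.getD j [])) with _ | j'
  · rw [hfind] at hf
    simp only at hf
    split_ifs at hf with hmem
    rw [List.find?_eq_none] at hfind
    exact ⟨fun j hj hmem' => by have := hfind j (List.mem_range.mpr hj); rw [List.getD_eq_getElem?_getD] at hmem'; simp [hmem'] at this, hmem⟩
  · rw [hfind] at hf; exact absurd hf (by simp)

theorem fhW_append_self_of_none {hss : List (List String)} {k : Nat} {hsp : List String} {h : String}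
    (hf : fhW hss k hsp h = none) : fhW hss k (hsp ++ [h]) h = some k := by
  rw [fhW] at hf ⊢
  rcases hfind : (List.range k).find? (fun j => decide (h ∈ hss.getD j [])) with _ | j'
  · simp [List.mem_append]
  · rw [hfind] at hf; exact absurd hf (by simp)

theorem fhW_append_of_ne {hss : List (List String)} {k : Nat} {hsp : List String} {h h' : String}
    (hne : h' ≠ h) : fhW hss k (hsp ++ [h]) h' = fhW hss k hsp h' := by
  rw [fhW, fhW]
  rcases hfind : (List.range k).find? (fun j => decide (h' ∈ hss.getD j [])) with _ | j'
  · simp [List.mem_append, hne]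
  · rfl

theorem fhW_append_self_of_some {hss : List (List String)} {k : Nat} {hsp : List String} {h : String} {j : Nat}
    (hf : fhW hss k hsp h = some j) : fhW hss k (hsp ++ [h]) h = some j := by
  rw [fhW] at hf ⊢
  rcases hfind : (List.range k).find? (fun j => decide (h ∈ hss.getD j [])) with _ | j'
  · rw [hfind] at hf
    simp only at hf
    split_ifs at hf with hmem
    · simp [List.mem_append, hmem, hf]
  · rw [hfind] at hf; exact hf

theorem fhW_row_step {hss : List (List String)} {k : Nat} {h : String} :
    fhW hss (k+1) [] h = fhW hss k (hss.getD k []) h := by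
  rw [fhW, fhW, List.range_succ, List.find?_append]
  rcases hfind : (List.range k).find? (fun j => decide (h ∈ hss.getD j [])) with _ | j'
  · simp only [Option.none_or]
    by_cases hmem : h ∈ hss.getD k []
    all_goals rw [List.getD_eq_getElem?_getD] at hmem
    · simp [hmem]
    · simp [hmem]
  · rfl

theorem B_inner (hss : List (List String)) (n : Nat) (hlenh : hss.length = n)
    (k : Nat) (hk : k < n) :
    ∀ (rest hsp : List String) (p : List Nat) (ow : PySem.Dict String Nat),
      hss.getD k [] = hsp ++ rest →
      UFInv n p (GenB hss k hsp) → OwnInv hss k hsp ow →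
      UFInv n (rest.foldl (fun (s : List Nat × PySem.Dict String Nat) h =>
          match s.2.get? h with
          | some j =>
            let fj := pvFind s.1.length s.1 j
            let fi := pvFind fj.1.length fj.1 k
            (fi.1.set fj.2 fi.2, s.2)
          | none => (s.1, s.2.insert h k)) (p, ow)).1 (GenB hss k (hsp ++ rest)) ∧
      OwnInv hss k (hsp ++ rest)
        (rest.foldl (fun (s : List Nat × PySem.Dict String Nat) h =>
          match s.2.get? h with
          | some j =>
            let fj := pvFind s.1.length s.1 j
            let fi := pvFind fj.1.length fj.1 k
            (fi.1.set fj.2 fi.2, s.2)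
          | none => (s.1, s.2.insert h k)) (p, ow)).2 := by
  intro rest
  induction rest with
  | nil => intro hsp p ow _ h1 h2; simpa using ⟨h1, h2⟩
  | cons h t ih =>
    intro hsp p ow hrow hUF hOwn
    rw [List.foldl_cons]
    have hmemrow : h ∈ hss.getD k [] := by rw [hrow]; simp
    have hrow' : hss.getD k [] = (hsp ++ [h]) ++ t := by rw [hrow]; simp
    rcases hget : ow.get? h with _ | j
    · -- new huc: record first holder
      have hfh : fhW hss k hsp h = none := by rw [← hOwn h]; exact hget
      obtain ⟨hnoj, hnsp⟩ := fhW_none hfh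
      simp only [hget]
      rw [show hsp ++ h :: t = (hsp ++ [h]) ++ t from by simp]
      apply ih (hsp ++ [h]) p (ow.insert h k) (by simpa using hrow')
      · apply UFInv_congr hUF
        · intro u v huv
          refine Relation.EqvGen.rel u v ?_
          rcases huv with h1 | ⟨h1, h2, h3, h4, h5⟩ | ⟨h1, h2, h3, h4, h5⟩
          · exact Or.inl h1
          · exact Or.inr (Or.inl ⟨h1, h2, h3, by simp [h4], h5⟩)
          · exact Or.inr (Or.inr ⟨h1, h2, h3, by simp [h4], h5⟩)
        · intro u v huv
          rcases huv with h1 | ⟨h1, h2, h3, h4, h5⟩ | ⟨h1, h2, h3, h4, h5⟩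
          · exact Relation.EqvGen.rel u v (Or.inl h1)
          · rcases List.mem_append.mp h4 with h4' | h4'
            · exact Relation.EqvGen.rel u v (Or.inr (Or.inl ⟨h1, h2, h3, h4', h5⟩))
            · rw [List.mem_singleton] at h4'; subst h4'
              exact absurd h5 (hnoj v h2)
          · rcases List.mem_append.mp h4 with h4' | h4'
            · exact Relation.EqvGen.rel u v (Or.inr (Or.inr ⟨h1, h2, h3, h4', h5⟩))
            · rw [List.mem_singleton] at h4'; subst h4'
              exact absurd h5 (hnoj u h2)
      · intro h'
        rw [PySem.Dict.get?_insert]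
        by_cases hh : h' = h
        · subst hh; rw [if_pos rfl, fhW_append_self_of_none hfh]
        · rw [if_neg hh, fhW_append_of_ne hh, hOwn h']
    · -- known huc: union with first holder
      have hfh : fhW hss k hsp h = some j := by rw [← hOwn h]; exact hget
      have hj := fhW_some hfh
      have hjn : j < n := by rcases hj with ⟨h1, _⟩ | ⟨h1, _⟩ <;> omega
      have hjh : h ∈ hss.getD j [] := by
        rcases hj with ⟨_, h2⟩ | ⟨h1, h2⟩
        · exact h2
        · subst h1; exact hmemrow
      simp only [hget]
      rw [show hsp ++ h :: t = (hsp ++ [h]) ++ t from by simp]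
      apply ih (hsp ++ [h]) (pvUnion p j k) ow (by simpa using hrow')
      · have h1 := UFInv_union (x := j) (y := k) hUF hjn hk
        apply UFInv_congr h1
        · intro u v huv
          rcases huv with ⟨hu', hv'⟩ | huv
          · rw [hu', hv']
            rcases hj with ⟨hjk, _⟩ | ⟨hjk, _⟩
            · exact Relation.EqvGen.rel j k (Or.inr (Or.inr ⟨rfl, hjk, h, by simp, hjh⟩))
            · rw [hjk]; exact Relation.EqvGen.refl k
          · rcases huv with h1' | ⟨h1', h2, h3, h4, h5⟩ | ⟨h1', h2, h3, h4, h5⟩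
            · exact Relation.EqvGen.rel u v (Or.inl h1')
            · exact Relation.EqvGen.rel u v (Or.inr (Or.inl ⟨h1', h2, h3, by simp [h4], h5⟩))
            · exact Relation.EqvGen.rel u v (Or.inr (Or.inr ⟨h1', h2, h3, by simp [h4], h5⟩))
        · intro u v huv
          have hpair : Relation.EqvGen (fun a b => (a = j ∧ b = k) ∨ GenB hss k hsp a b) j k :=
            Relation.EqvGen.rel j k (Or.inl ⟨rfl, rfl⟩)
          have hold : ∀ a b, GenB hss k hsp a b →
              Relation.EqvGen (fun a b => (a = j ∧ b = k) ∨ GenB hss k hsp a b) a b :=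
            fun a b hab => Relation.EqvGen.rel a b (Or.inr hab)
          rcases huv with h1' | ⟨h1', h2, h3, h4, h5⟩ | ⟨h1', h2, h3, h4, h5⟩
          · exact hold u v (Or.inl h1')
          · rcases List.mem_append.mp h4 with h4' | h4'
            · exact hold u v (Or.inr (Or.inl ⟨h1', h2, h3, h4', h5⟩))
            · rw [List.mem_singleton] at h4'; subst h4'
              -- u = k, v < k, h ∈ hss v: u ~ k ~ j ~ v
              subst h1'
              rcases hj with ⟨hjk, _⟩ | ⟨hjk, hjsp⟩
              · refine Relation.EqvGen.trans _ j _ (Relation.EqvGen.symm _ _ hpair) ?_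
                exact hold j v (Or.inl ⟨hjk, h2, ⟨h3, hjh, h5⟩⟩)
              · exact hold u v (Or.inr (Or.inl ⟨rfl, h2, h3, hjsp, h5⟩))
          · rcases List.mem_append.mp h4 with h4' | h4'
            · exact hold u v (Or.inr (Or.inr ⟨h1', h2, h3, h4', h5⟩))
            · rw [List.mem_singleton] at h4'; subst h4'
              subst h1'
              rcases hj with ⟨hjk, _⟩ | ⟨hjk, hjsp⟩
              · refine Relation.EqvGen.trans _ j _ ?_ hpair
                exact hold u j (Or.inl ⟨h2, hjk, ⟨h3, h5, hjh⟩⟩)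
              · exact hold u v (Or.inr (Or.inr ⟨rfl, h2, h3, hjsp, h5⟩))
      · intro h'
        by_cases hh : h' = h
        · subst hh; rw [hOwn h', fhW_append_self_of_some hfh, hfh]
        · rw [fhW_append_of_ne hh, hOwn h']

theorem B_outer (hss : List (List String)) (n : Nat) (hlenh : hss.length = n) :
    ∀ (xs : List (List String)) (k : Nat) (p : List Nat) (ow : PySem.Dict String Nat),
      hss.drop k = xs →
      UFInv n p (GenBR hss k) → OwnInv hss k [] ow →
      UFInv n ((xs.zipIdx k).foldl (fun (s : List Nat × PySem.Dict String Nat) hsi =>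
          hsi.1.foldl (fun (s : List Nat × PySem.Dict String Nat) h =>
            match s.2.get? h with
            | some j =>
              let fj := pvFind s.1.length s.1 j
              let fi := pvFind fj.1.length fj.1 hsi.2
              (fi.1.set fj.2 fi.2, s.2)
            | none => (s.1, s.2.insert h hsi.2)) s) (p, ow)).1 (GenBR hss (k + xs.length)) := by
  intro xs
  induction xs with
  | nil => intro k p ow _ h _; simpa using h
  | cons r xs ih =>
    intro k p ow hdrop hUF hOwn
    have hk : k < hss.length := by
      by_contra hc'
      rw [List.drop_eq_nil_of_le (by omega)] at hdrop
      exact absurd hdrop.symm (List.cons_ne_nil r xs)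
    have hdrop' : hss.drop (k+1) = xs := by
      rw [← List.drop_drop, hdrop]; simp
    have hr : hss.getD k [] = r := by
      have h0 : (hss.drop k)[0]? = some r := by rw [hdrop]; rfl
      rw [List.getElem?_drop] at h0
      rw [List.getD_eq_getElem?_getD]
      simp only [Nat.add_zero] at h0
      rw [h0]
      rfl
    rw [List.zipIdx_cons, List.foldl_cons]
    have hlen2 : k + (r :: xs).length = (k+1) + xs.length := by simp; omega
    rw [hlen2]
    -- row k
    have hrow := B_inner hss n hlenh k (by omega) r [] p ow (by simpa using hr)
      (UFInv_congr hUF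
        (fun u v huv => Relation.EqvGen.rel u v (Or.inl huv))
        (fun u v huv => by
          rcases huv with h1 | ⟨_, _, _, h4, _⟩ | ⟨_, _, _, h4, _⟩
          · exact Relation.EqvGen.rel u v h1
          · simp at h4
          · simp at h4))
      hOwn
    obtain ⟨hUF', hOwn'⟩ := hrow
    apply ih (k+1) _ _ hdrop'
    · apply UFInv_congr hUF'
      · intro u v huv
        refine Relation.EqvGen.rel u v ?_
        rcases huv with ⟨h1, h2, h3⟩ | ⟨h1, h2, h3, h4, h5⟩ | ⟨h1, h2, h3, h4, h5⟩
        · exact ⟨by omega, by omega, h3⟩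
        · exact ⟨by omega, by omega, ⟨h3, by rw [h1, hr]; simpa using h4, h5⟩⟩
        · exact ⟨by omega, by omega, ⟨h3, h5, by rw [h1, hr]; simpa using h4⟩⟩
      · intro u v huv
        obtain ⟨h1, h2, h3⟩ := huv
        by_cases hu : u < k
        · by_cases hv : v < k
          · exact Relation.EqvGen.rel u v (Or.inl ⟨hu, hv, h3⟩)
          · have hvk : v = k := by omega
            obtain ⟨w, hw1, hw2⟩ := h3
            refine Relation.EqvGen.rel u v (Or.inr (Or.inr ⟨hvk, hu, w, ?_, hw1⟩))
            simp only [List.nil_append]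
            rw [← hr, ← hvk]
            exact hw2
        · have huk : u = k := by omega
          by_cases hv : v < k
          · obtain ⟨w, hw1, hw2⟩ := h3
            refine Relation.EqvGen.rel u v (Or.inr (Or.inl ⟨huk, hv, w, ?_, hw2⟩))
            simp only [List.nil_append]
            rw [← hr, ← huk]
            exact hw1
          · have : u = v := by omega
            rw [this]
            exact Relation.EqvGen.refl v
    · intro h'
      rw [hOwn' h', fhW_row_step, hr]
      simp

theorem OwnInv_init (hss : List (List String)) : OwnInv hss 0 [] PySem.Dict.empty := by
  intro h
  rw [PySem.Dict.get?_empty, fhW]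
  simp

theorem B_run (hss : List (List String)) (n : Nat) (hlenh : hss.length = n) :
    UFInv n ((hss.zipIdx).foldl (fun (s : List Nat × PySem.Dict String Nat) hsi =>
        hsi.1.foldl (fun (s : List Nat × PySem.Dict String Nat) h =>
          match s.2.get? h with
          | some j =>
            let fj := pvFind s.1.length s.1 j
            let fi := pvFind fj.1.length fj.1 hsi.2
            (fi.1.set fj.2 fi.2, s.2)
          | none => (s.1, s.2.insert h hsi.2)) s) (List.range n, PySem.Dict.empty)).1
      (ShareH hss) := by
  have h := B_outer hss n hlenh hss 0 (List.range n) PySem.Dict.empty (by simp)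
    (UFInv_congr (UFInv_init n hss)
      (fun u v huv => absurd huv.2 (by omega))
      (fun u v huv => absurd huv.1 (by omega)))
    (OwnInv_init hss)
  simp only [Nat.zero_add, hlenh] at h
  apply UFInv_congr h
  · intro u v huv
    exact Relation.EqvGen.rel u v huv.2.2
  · intro u v huv
    have hb := shareH_lt huv
    exact Relation.EqvGen.rel u v ⟨by omega, by omega, huv⟩

-- ===== grouping phase =====
theorem group_fold (n : Nat) :
    ∀ (l : List (Int × Nat)) (p : List Nat) (hgt : Nat → Nat) (grp : PySem.Dict Nat (List Int)),
      GoodC p hgt → p.length = n → (∀ gi ∈ l, gi.2 < n) →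
      (l.foldl (fun (s : List Nat × PySem.Dict Nat (List Int)) gi =>
          let f := pvFind s.1.length s.1 gi.2
          (f.1, s.2.modify f.2 [] (· ++ [gi.1]))) (p, grp)).2
        = l.foldl (fun g gi => g.modify (rootOf p gi.2) [] (· ++ [gi.1])) grp := by
  intro l
  induction l with
  | nil => intro p hgt grp _ _ _; rfl
  | cons gi t ih =>
    intro p hgt grp hG hlen hmem
    rw [List.foldl_cons, List.foldl_cons]
    obtain ⟨h1, h2, h3, h4⟩ := pvFind_run hG (hlen ▸ hmem gi (by simp))
    rw [hlen] at h1 h2 h3 h4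
    simp only
    rw [hlen, h1]
    rw [ih (pvFind n p gi.2).1 hgt _ h3 (by omega) (fun x hx => hmem x (by simp [hx]))]
    apply PySem.List.foldl_congr_mem
    intro acc x hx
    rw [h4 x.2 (hmem x (by simp [hx]))]

theorem mem_keymap_iff (r : Nat → Nat) (gs : List Int) (x : Nat) :
    x ∈ (gs.zipIdx.map (fun gi => r gi.2)) ↔ ∃ i, i < gs.length ∧ r i = x := by
  rw [List.mem_map]
  constructor
  · rintro ⟨gi, hmem, hx⟩
    have : gs[gi.2]? = some gi.1 := List.mem_zipIdx_iff_getElem?.mp hmem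
    exact ⟨gi.2, by simpa using List.getElem?_eq_some_iff.mp this |>.choose, hx⟩
  · rintro ⟨i, hi, hx⟩
    exact ⟨(gs[i], i), List.mem_zipIdx_iff_getElem?.mpr (by simp), hx⟩

theorem ofList_keys_eq (r : Nat → Nat) (gauges : List Int) :
    PySem.Set.ofList ((gauges.zipIdx).map (fun gi => r gi.2)) =
      ((List.range gauges.length).filter (fun i => decide (∀ j, j < i → r j ≠ r i))).map r := by
  induction gauges using List.reverseRecOn with
  | nil => simp [PySem.Set.ofList_nil]
  | append_singleton gs g ih =>
    rw [List.zipIdx_append, List.map_append]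
    simp only [List.zipIdx_cons, List.zipIdx_nil, List.map_cons, List.map_nil, Nat.zero_add]
    rw [PySem.Set.ofList_append_singleton, ih, List.length_append, List.length_singleton,
      List.range_succ, List.filter_append, List.map_append]
    by_cases hP : ∀ j, j < gs.length → r j ≠ r gs.length
    · have hnot : r gs.length ∉ PySem.Set.ofList (List.map (fun gi => r gi.2) gs.zipIdx) := by
        rw [PySem.Set.mem_ofList, mem_keymap_iff]
        rintro ⟨i, hi, heq⟩
        exact hP i hi heq
      rw [ih] at hnot
      rw [PySem.Set.add_of_not_mem hnot, List.filter_singleton]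
      have hdec : decide (∀ j < gs.length, ¬ r j = r gs.length) = true := decide_eq_true (by exact_mod_cast hP)
      rw [hdec]
      simp
    · have hmem : r gs.length ∈ PySem.Set.ofList (List.map (fun gi => r gi.2) gs.zipIdx) := by
        rw [PySem.Set.mem_ofList, mem_keymap_iff]
        push_neg at hP
        obtain ⟨i, hi, heq⟩ := hP
        exact ⟨i, hi, heq⟩
      rw [ih] at hmem
      rw [PySem.Set.add_of_mem hmem, List.filter_singleton]
      have hdec : decide (∀ j < gs.length, ¬ r j = r gs.length) = false := by
        simp only [decide_eq_false_iff_not]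
        push_neg at hP ⊢
        exact hP
      rw [hdec]
      simp

def grpVals (r : Nat → Nat) (gauges : List Int) : List (List Int) :=
  ((gauges.zipIdx).foldl (fun g gi => g.modify (r gi.2) [] (· ++ [gi.1])) PySem.Dict.empty).values

theorem grpVals_closed (r : Nat → Nat) (gauges : List Int) :
    grpVals r gauges =
      ((List.range gauges.length).filter (fun i => decide (∀ j, j < i → r j ≠ r i))).map
        (fun i => ((gauges.zipIdx).filter (fun gi => r gi.2 == r i)).map (·.1)) := by
  have hkeys : ((gauges.zipIdx).foldl (fun g gi => g.modify (r gi.2) [] (· ++ [gi.1]))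
      (PySem.Dict.empty : PySem.Dict Nat (List Int))).keys
      = PySem.Set.ofList ((gauges.zipIdx).map (fun gi => r gi.2)) := by
    rw [PySem.Dict.keys_foldl_modify_key (gauges.zipIdx) (fun gi => r gi.2) []
      (fun _ gi => (· ++ [gi.1])) PySem.Dict.empty]
    rw [PySem.Dict.keys_empty, PySem.Set.update_nil_left]
  have hnodup : ((gauges.zipIdx).foldl (fun g gi => g.modify (r gi.2) [] (· ++ [gi.1]))
      (PySem.Dict.empty : PySem.Dict Nat (List Int))).keys.Nodup := by
    apply PySem.Dict.nodup_keys_foldl_modify_key (gauges.zipIdx) (fun gi => r gi.2) []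
      (fun _ gi => (· ++ [gi.1])) PySem.Dict.empty
    rw [PySem.Dict.keys_empty]
    exact List.nodup_nil
  have hgetD : ∀ c, ((gauges.zipIdx).foldl (fun g gi => g.modify (r gi.2) [] (· ++ [gi.1]))
      (PySem.Dict.empty : PySem.Dict Nat (List Int))).getD c []
      = ((gauges.zipIdx).filter (fun gi => r gi.2 == c)).map (·.1) := by
    intro c
    have hfold : (gauges.zipIdx).foldl (fun g gi => g.modify (r gi.2) [] (· ++ [gi.1]))
        (PySem.Dict.empty : PySem.Dict Nat (List Int))
        = ((gauges.zipIdx).map (fun gi => (r gi.2, gi.1))).foldl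
            (fun d q => d.modify q.1 [] (· ++ [q.2])) PySem.Dict.empty := by
      rw [List.foldl_map]
    rw [hfold, PySem.Dict.getD_foldl_modify_append, PySem.Dict.getD_empty, List.nil_append,
      List.filter_map, List.map_map]
    rfl
  rw [grpVals, PySem.Dict.values_eq_map_keys _ hnodup [], hkeys, ofList_keys_eq, List.map_map]
  apply List.map_congr_left
  intro i _
  simp only [Function.comp]
  rw [hgetD (r i)]

theorem grpVals_pattern (r1 r2 : Nat → Nat) (gauges : List Int)
    (hpat : ∀ i j, i < gauges.length → j < gauges.length → (r1 i = r1 j ↔ r2 i = r2 j)) :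
    grpVals r1 gauges = grpVals r2 gauges := by
  rw [grpVals_closed, grpVals_closed]
  have hfil : (List.range gauges.length).filter (fun i => decide (∀ j, j < i → r1 j ≠ r1 i))
      = (List.range gauges.length).filter (fun i => decide (∀ j, j < i → r2 j ≠ r2 i)) := by
    apply List.filter_congr
    intro i hi
    have hi' := List.mem_range.mp hi
    simp only [decide_eq_decide]
    constructor
    · intro hall j hj heq
      exact hall j hj ((hpat j i (by omega) hi').mpr heq)
    · intro hall j hj heq
      exact hall j hj ((hpat j i (by omega) hi').mp heq)
  rw [← hfil]
  apply List.map_congr_left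
  intro i hi
  have hi' := List.mem_range.mp (List.mem_of_mem_filter hi)
  congr 1
  apply List.filter_congr
  intro gi hgi
  have hgi2 : gi.2 < gauges.length := by
    have : gauges[gi.2]? = some gi.1 := List.mem_zipIdx_iff_getElem?.mp (by
      have : gi = (gi.1, gi.2) := rfl
      rw [← this] at *
      exact hgi)
    simpa using List.getElem?_eq_some_iff.mp this |>.choose
  rw [Bool.eq_iff_iff, beq_iff_eq, beq_iff_eq]
  exact hpat gi.2 i hgi2 hi'

theorem ports_eq (gs : List (Int × List String)) :
    nesting_groups_py gs = nesting_groups_py_alt gs := by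
  rw [nesting_groups_py, nesting_groups_py_alt]
  set d : PySem.Dict Int (List String) := PySem.Dict.ofList gs with hd
  set gauges : List Int := d.keys with hgauges
  set hss : List (List String) := d.values with hhss
  set n : Nat := gauges.length with hn
  have hlenh : hss.length = n := by
    rw [hhss, hn, hgauges, PySem.Dict.keys, PySem.Dict.values, List.length_map, List.length_map]
  have hsize : d.size = n := by
    rw [PySem.Dict.size, hn, hgauges, PySem.Dict.keys, List.length_map]
  have hnodup : gauges.Nodup := PySem.Dict.nodup_keys_ofList gs
  -- sub_sets lookup: the set of row i
  set subSets : PySem.Dict Int (PySem.Set String) :=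
    PySem.Dict.ofList (d.items.map (fun gh => (gh.1, PySem.Set.ofList gh.2))) with hsub
  have hsubItems : subSets.items = d.items.map (fun gh => (gh.1, PySem.Set.ofList gh.2)) := by
    rw [hsub, PySem.Dict.ofList, PySem.Dict.update]
    have hnd : ((d.items.map (fun gh => (gh.1, PySem.Set.ofList gh.2))).map
        (fun q : Int × PySem.Set String => q.1)).Nodup := by
      have : (d.items.map (fun gh => (gh.1, PySem.Set.ofList gh.2))).map
          (fun q : Int × PySem.Set String => q.1) = gauges := by
        rw [List.map_map, hgauges, PySem.Dict.keys]
        rfl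
      rw [this]
      exact hnodup
    have hfr := PySem.Dict.items_foldl_insert_fresh
      (d.items.map (fun gh => (gh.1, PySem.Set.ofList gh.2)))
      (fun q : Int × PySem.Set String => q.1) (fun q : Int × PySem.Set String => q.2)
      PySem.Dict.empty (fun a _ => PySem.Dict.contains_empty a.1) hnd
    simpa using hfr
  have hsubKeys : subSets.keys = gauges := by
    rw [PySem.Dict.keys, hsubItems, List.map_map, hgauges, PySem.Dict.keys]
    rfl
  have hgetSub : ∀ i, i < n → subSets.getD (gauges.getD i 0) [] = PySem.Set.ofList (hss.getD i []) := by
    intro i hi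
    have hni : i < d.items.length := by
      have : gauges.length = d.items.length := by rw [hgauges, PySem.Dict.keys, List.length_map]
      omega
    have hkey : gauges.getD i 0 = (d.items[i]).1 := by
      rw [hgauges, PySem.Dict.keys, List.getD_eq_getElem?_getD,
        List.getElem?_eq_getElem (by simpa using hni)]
      simp
    have hval : hss.getD i [] = (d.items[i]).2 := by
      rw [hhss, PySem.Dict.values, List.getD_eq_getElem?_getD,
        List.getElem?_eq_getElem (by simpa using hni)]
      simp
    have hmem : (gauges.getD i 0, PySem.Set.ofList (hss.getD i [])) ∈ subSets.items := by
      rw [hsubItems, hkey, hval, List.mem_map]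
      exact ⟨d.items[i], by simp, rfl⟩
    exact PySem.Dict.getD_of_mem_items subSets hmem (hsubKeys ▸ hnodup) []
  -- the share condition
  have hcond : ∀ i j, i < n → j < n →
      ((PySem.Set.inter (subSets.getD (gauges.getD i 0) [])
        (subSets.getD (gauges.getD j 0) []) ≠ []) ↔ ShareH hss i j) := by
    intro i j hi hj
    rw [hgetSub i hi, hgetSub j hj, Ne, List.eq_nil_iff_forall_not_mem]
    push_neg
    constructor
    · rintro ⟨h, hmem⟩
      rw [PySem.Set.mem_inter, PySem.Set.mem_ofList, PySem.Set.mem_ofList] at hmem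
      exact ⟨h, hmem⟩
    · rintro ⟨h, h1, h2⟩
      exact ⟨h, by rw [PySem.Set.mem_inter, PySem.Set.mem_ofList, PySem.Set.mem_ofList]; exact ⟨h1, h2⟩⟩
  -- rewrite A's double loop into index form
  set c2 : Nat → Nat → Bool :=
    fun i j => (hss.getD i []).any (fun h => decide (h ∈ hss.getD j [])) with hc2
  have hc2iff : ∀ i j, c2 i j = true ↔ ShareH hss i j := by
    intro i j
    simp [hc2, ShareH, List.any_eq_true]
  have hAloop : (gauges.zipIdx).foldl (fun p ai =>
      ((gauges.drop (ai.2+1)).zipIdx (ai.2+1)).foldl (fun p bj =>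
        if PySem.Set.inter (subSets.getD ai.1 []) (subSets.getD bj.1 []) ≠ [] then
          pvUnion p ai.2 bj.2
        else p) p) (List.range gauges.length)
      = (gauges.zipIdx).foldl (fun p ai =>
      ((gauges.drop (ai.2+1)).zipIdx (ai.2+1)).foldl (fun p bj =>
        if c2 ai.2 bj.2 then pvUnion p ai.2 bj.2 else p) p) (List.range n) := by
    rw [← hn]
    apply PySem.List.foldl_congr_mem
    intro p ai hai
    have hai' : gauges[ai.2]? = some ai.1 := List.mem_zipIdx_iff_getElem?.mp (by
      have : ai = (ai.1, ai.2) := rfl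
      rw [← this] at *; exact hai)
    have hailt : ai.2 < n := by simpa [hn] using (List.getElem?_eq_some_iff.mp hai').choose
    have haiv : gauges.getD ai.2 0 = ai.1 := by
      rw [List.getD_eq_getElem?_getD, hai']; rfl
    apply PySem.List.foldl_congr_mem
    intro q bj hbj
    obtain ⟨hk1, hk2, hk3⟩ := List.mem_zipIdx (x := bj.1) (i := bj.2) (by
      have : bj = (bj.1, bj.2) := rfl
      rw [← this] at *; exact hbj)
    have hbjlt : bj.2 < n := by
      rw [List.length_drop] at hk2; omega
    have h5 : (gauges.drop (ai.2+1))[bj.2 - (ai.2+1)]? = gauges[bj.2]? := by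
      rw [List.getElem?_drop]
      congr 1
      omega
    have hbv : gauges[bj.2]? = some bj.1 := by
      rw [← h5, List.getElem?_eq_getElem (by rw [List.length_drop]; omega)]
      exact (congrArg some hk3).symm
    have hbjv : gauges.getD bj.2 0 = bj.1 := by
      rw [List.getD_eq_getElem?_getD, hbv]; rfl
    rw [← haiv, ← hbjv]
    by_cases hcc : ShareH hss ai.2 bj.2
    · rw [if_pos ((hcond ai.2 bj.2 hailt hbjlt).mpr hcc), if_pos ((hc2iff ai.2 bj.2).mpr hcc)]
    · rw [if_neg (fun hne => hcc ((hcond ai.2 bj.2 hailt hbjlt).mp hne)),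
        if_neg (fun hne => hcc ((hc2iff ai.2 bj.2).mp hne))]
  rw [hAloop]
  have hA := A_run hss gauges n hn hlenh c2 (fun i j _ hj => hc2iff i j)
  have hB := B_run hss n hlenh
  rw [hsize]
  -- grouping phase on both sides
  obtain ⟨⟨hgtA, hGA⟩, hlenA, hpatA⟩ := hA
  obtain ⟨⟨hgtB, hGB⟩, hlenB, hpatB⟩ := hB
  have hidx : ∀ gi ∈ gauges.zipIdx, (gi : Int × Nat).2 < n := by
    intro gi hgi
    have : gauges[gi.2]? = some gi.1 := List.mem_zipIdx_iff_getElem?.mp (by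
      have : gi = (gi.1, gi.2) := rfl
      rw [← this] at *; exact hgi)
    simpa [hn] using (List.getElem?_eq_some_iff.mp this).choose
  rw [group_fold n _ _ hgtA _ hGA hlenA hidx, group_fold n _ _ hgtB _ hGB hlenB hidx]
  show grpVals _ gauges = grpVals _ gauges
  apply grpVals_pattern
  intro i j hi hj
  rw [hpatA i j (hn ▸ hi) (hn ▸ hj), hpatB i j (hn ▸ hi) (hn ▸ hj)]

-- ===== VERDICT =====
theorem nesting_groups_py_spec : Claim_equal_nesting_groups_py := by
  intro gauge_huc12s _
  exact ports_eq gauge_huc12s
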